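-- pv_equiv track=rewrite | github.com/ecruzt/TF_Info1 | funciones.py | key_mayor_valor_repetido
-- ===== SOURCE A (Python) =====
-- def key_mayor_valor_repetido(diccionario):
--     """
--     Revisa un diccionario para encontrar valores repetidos y retorna la clave mayor entre aquellas que tienen
--     el mismo valor, junto con un diccionario que contiene las claves mayores y sus respectivos valores repetidos.
--
--     Parámetros:
--     diccionario (dict): El diccionario a evaluar, con formato {key: value}.
--
--     Retorna:
--     tuple: Una tupla que contiene la clave mayor entre aquellas que tienen valores repetidos
--            y un diccionario que contiene las claves mayores y sus respectivos valores repetidos.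
--     """
--
--     # Crear un diccionario para contar las ocurrencias de cada valor
--     conteo_valores = {}
--     for key, value in diccionario.items():
--         if value in conteo_valores:
--             conteo_valores[value].append(key)
--         else:
--             conteo_valores[value] = [key]
--
--     # Revisar los valores repetidos y encontrar la clave mayor entre ellos
--     keys_mayores = {}
--     for valor, keys in conteo_valores.items():
--         if len(keys) > 1:  # Si hay más de una key para el mismo valor
--             key_mayor = max(keys)
--             keys_mayores[key_mayor] = valor
--
--     # Retornar la clave mayor y el diccionario de claves mayores y sus valores repetidos
--     clave_mayor = max(keys_mayores.keys()) if keys_mayores else None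
--     return clave_mayor, keys_mayores
-- ===== SOURCE B (Python) =====
-- def key_mayor_valor_repetido(diccionario):
--     # Count occurrences of each value in one pass, then keep a running max key
--     # per duplicated value in a second pass -- no per-group key lists are built.
--     conteo = {}
--     for v in diccionario.values():
--         conteo[v] = conteo.get(v, 0) + 1
--
--     mejor_por_valor = {}  # value -> largest key seen so far (duplicated values only)
--     for k, v in diccionario.items():
--         if conteo[v] > 1:
--             if v not in mejor_por_valor:
--                 mejor_por_valor[v] = k
--             elif k > mejor_por_valor[v]:
--                 mejor_por_valor[v] = k
--
--     keys_mayores = {k: v for v, k in mejor_por_valor.items()}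
--     clave_mayor = max(keys_mayores) if keys_mayores else None
--     return clave_mayor, keys_mayores
-- ===== Notes on version B (the rewrite author's own statement) =====
-- stated objective: alternative
-- what changed: Replaces A's grouping dict of per-value key lists (then max over each list) by a counting pass plus a second pass keeping only a running maximum key per duplicated value, so no per-group lists are ever built.
import Mathlib
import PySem

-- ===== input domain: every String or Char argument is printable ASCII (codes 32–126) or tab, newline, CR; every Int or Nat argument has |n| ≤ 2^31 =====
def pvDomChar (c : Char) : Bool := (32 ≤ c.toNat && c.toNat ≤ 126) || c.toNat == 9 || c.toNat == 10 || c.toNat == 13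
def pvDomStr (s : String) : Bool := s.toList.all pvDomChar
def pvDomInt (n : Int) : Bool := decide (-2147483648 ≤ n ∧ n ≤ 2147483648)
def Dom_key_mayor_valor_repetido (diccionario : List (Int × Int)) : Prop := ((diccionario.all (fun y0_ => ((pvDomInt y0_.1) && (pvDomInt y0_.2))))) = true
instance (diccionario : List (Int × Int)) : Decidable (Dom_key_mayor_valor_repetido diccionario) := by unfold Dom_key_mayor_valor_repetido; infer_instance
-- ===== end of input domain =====

-- B replaces A's per-value key-list grouping by a counting pass plus a running per-value
-- maximum key (no per-group lists); same return value, the dict is returned as its items list.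

-- ===== PORT A =====
def key_mayor_valor_repetido (diccionario : List (Int × Int)) : Option Int × (List (Int × Int)) :=
  let conteo_valores : PySem.Dict Int (List Int) :=
    diccionario.foldl (fun d p =>
      if d.contains p.2 then d.insert p.2 (d.getD p.2 [] ++ [p.1])
      else d.insert p.2 [p.1]) PySem.Dict.empty
  let keys_mayores : PySem.Dict Int Int :=
    conteo_valores.items.foldl (fun m q =>
      if 1 < q.2.length then
        match PySem.List.max? q.2 (fun y => y) with
        | some key_mayor => m.insert key_mayor q.1
        | none => m
      else m) PySem.Dict.empty
  let clave_mayor : Option Int :=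
    if keys_mayores.size = 0 then none
    else PySem.List.max? keys_mayores.keys (fun y => y)
  (clave_mayor, keys_mayores.items)

-- ===== PORT B =====
def key_mayor_valor_repetido_alt (diccionario : List (Int × Int)) : Option Int × (List (Int × Int)) :=
  let conteo : PySem.Dict Int Int :=
    diccionario.foldl (fun d p => d.insert p.2 (d.getD p.2 0 + 1)) PySem.Dict.empty
  let mejor_por_valor : PySem.Dict Int Int :=
    diccionario.foldl (fun m p =>
      if 1 < conteo.getD p.2 0 then
        match m.get? p.2 with
        | none => m.insert p.2 p.1
        | some mejor => if mejor < p.1 then m.insert p.2 p.1 else m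
      else m) PySem.Dict.empty
  let keys_mayores : PySem.Dict Int Int :=
    mejor_por_valor.items.foldl (fun km q => km.insert q.2 q.1) PySem.Dict.empty
  let clave_mayor : Option Int :=
    if keys_mayores.size = 0 then none
    else PySem.List.max? keys_mayores.keys (fun y => y)
  (clave_mayor, keys_mayores.items)

-- ===== PRECONDITION & SPEC =====
def Spec_key_mayor_valor_repetido (diccionario : List (Int × Int)) (out : Option Int × (List (Int × Int))) : Prop := out = key_mayor_valor_repetido_alt diccionario
instance (diccionario : List (Int × Int)) (out : Option Int × (List (Int × Int))) : Decidable (Spec_key_mayor_valor_repetido diccionario out) := by unfold Spec_key_mayor_valor_repetido; infer_instance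

-- ===== CLAIM (what is proved, stated in full; the proofs are below) =====
def Claim_equal_key_mayor_valor_repetido : Prop := ∀ (diccionario : List (Int × Int)), Dom_key_mayor_valor_repetido diccionario → Spec_key_mayor_valor_repetido diccionario (key_mayor_valor_repetido diccionario)

-- ===== LEMMAS AND PROOFS =====

-- keys of the pairs of L whose value is v, in order
def pvKs (L : List (Int × Int)) (v : Int) : List Int :=
  (L.filter (fun p => p.2 == v)).map Prod.fst

-- max key within value group v (0 is a junk default, only read off nonempty groups)
def pvMx (L : List (Int × Int)) (v : Int) : Int :=
  (PySem.List.max? (pvKs L v) (fun y => y)).getD 0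

-- "value v is duplicated in L"
def pvC (L : List (Int × Int)) (v : Int) : Bool := decide (1 < (pvKs L v).length)

-- the common normal form of both final dicts
def pvD0 (L : List (Int × Int)) : PySem.Dict Int Int :=
  ((PySem.Set.ofList (L.map Prod.snd)).filter (pvC L)).foldl
    (fun m v => m.insert (pvMx L v) v) PySem.Dict.empty

theorem pvKs_append (L : List (Int × Int)) (x : Int × Int) (v : Int) :
    pvKs (L ++ [x]) v = pvKs L v ++ if x.2 == v then [x.1] else [] := by
  simp only [pvKs, List.filter_append, List.map_append]
  by_cases h : x.2 = v <;> simp [h]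

theorem pvMx_append_ne (L : List (Int × Int)) (k v v' : Int) (h : v ≠ v') :
    pvMx (L ++ [(k, v)]) v' = pvMx L v' := by
  simp [pvMx, pvKs_append, h]

theorem pvMx_append_self (L : List (Int × Int)) (k v : Int) :
    pvMx (L ++ [(k, v)]) v = if pvKs L v = [] then k else max (pvMx L v) k := by
  have hks : pvKs (L ++ [(k, v)]) v = pvKs L v ++ [k] := by simp [pvKs_append]
  cases h : pvKs L v with
  | nil => simp [pvMx, hks, h, PySem.List.max?_id_cons]
  | cons a t =>
    simp [pvMx, hks, h, PySem.List.max?_id_cons, List.foldl_append]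

theorem pvKs_eq_nil_of_not_mem (L : List (Int × Int)) (v : Int)
    (h : v ∉ L.map Prod.snd) : pvKs L v = [] := by
  simp only [pvKs, List.map_eq_nil_iff, List.filter_eq_nil_iff]
  intro p hp
  simp only [beq_iff_eq]
  exact fun hv => h (List.mem_map.2 ⟨p, hp, hv⟩)

theorem pvKs_ne_nil_of_mem (L : List (Int × Int)) (v : Int)
    (h : v ∈ L.map Prod.snd) : pvKs L v ≠ [] := by
  obtain ⟨p, hp, hv⟩ := List.mem_map.1 h
  intro hnil
  rw [pvKs, List.map_eq_nil_iff, List.filter_eq_nil_iff] at hnil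
  exact hnil p hp (by simp [hv])

theorem length_pvKs (L : List (Int × Int)) (v : Int) :
    (pvKs L v).length = (L.map Prod.snd).count v := by
  simp only [pvKs, List.length_map, List.count, List.countP_map]
  rw [List.countP_eq_length_filter]
  rfl

-- B's second loop, characterised: its items are the duplicated values (first-occurrence
-- order) paired with the running max key of their group.
theorem mejor_items (c : Int → Bool) (L : List (Int × Int)) :
    (L.foldl (fun (m : PySem.Dict Int Int) (p : Int × Int) =>
        if c p.2 then
          match m.get? p.2 with
          | none => m.insert p.2 p.1
          | some mejor => if mejor < p.1 then m.insert p.2 p.1 else m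
        else m) PySem.Dict.empty).items
      = ((PySem.Set.ofList (L.map Prod.snd)).filter c).map (fun v => (v, pvMx L v)) := by
  induction L using List.reverseRecOn with
  | nil => rfl
  | append_singleton L x ih =>
    obtain ⟨k, v⟩ := x
    rw [List.foldl_append]
    set M := L.foldl (fun (m : PySem.Dict Int Int) (p : Int × Int) =>
        if c p.2 then
          match m.get? p.2 with
          | none => m.insert p.2 p.1
          | some mejor => if mejor < p.1 then m.insert p.2 p.1 else m
        else m) PySem.Dict.empty with hM
    set S := (PySem.Set.ofList (L.map Prod.snd)).filter c with hS
    have nodupS : S.Nodup := (PySem.Set.nodup_ofList _).filter _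
    have hkeys : M.keys = S := by
      simp [PySem.Dict.keys, ih, Function.comp_def]
    have hRHSset : (PySem.Set.ofList ((L ++ [(k, v)]).map Prod.snd))
        = (PySem.Set.ofList (L.map Prod.snd)).add v := by
      simp [PySem.Set.ofList_append_singleton]
    by_cases hc : c v = true
    · by_cases hv : v ∈ L.map Prod.snd
      · have hvS : v ∈ S := List.mem_filter.2 ⟨(PySem.Set.mem_ofList _ _).2 hv, hc⟩
        have hmemit : (v, pvMx L v) ∈ M.items := by
          rw [ih]; exact List.mem_map.2 ⟨v, hvS, rfl⟩
        have hget : M.get? v = some (pvMx L v) :=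
          PySem.Dict.get?_of_mem_items M hmemit (hkeys ▸ nodupS)
        have hcont : M.contains v = true := (PySem.Dict.contains_iff_mem_keys M v).2 (hkeys ▸ hvS)
        have hksne : pvKs L v ≠ [] := pvKs_ne_nil_of_mem L v hv
        have hmx : pvMx (L ++ [(k, v)]) v = max (pvMx L v) k := by
          rw [pvMx_append_self]; simp [hksne]
        have hradd : (PySem.Set.ofList (L.map Prod.snd)).add v
            = PySem.Set.ofList (L.map Prod.snd) :=
          PySem.Set.add_of_mem ((PySem.Set.mem_ofList _ _).2 hv)
        rw [hRHSset, hradd]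
        by_cases hlt : pvMx L v < k
        · simp only [List.foldl_cons, List.foldl_nil, hc, if_true, hget, hlt]
          rw [PySem.Dict.items_insert_of_contains M k hcont, ih, List.map_map, ← hS]
          apply List.map_congr_left
          intro v' hv'
          by_cases hvv : v' = v
          · subst hvv
            simp [hmx, max_eq_right (le_of_lt hlt)]
          · simp [Function.comp, hvv, pvMx_append_ne L k v v' (fun h => hvv h.symm)]
        · simp only [List.foldl_cons, List.foldl_nil, hc, if_true, hget, hlt, if_false]
          rw [ih, ← hS]
          apply List.map_congr_left
          intro v' hv'
          by_cases hvv : v' = v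
          · subst hvv
            simp [hmx, max_eq_left (le_of_not_gt hlt)]
          · simp [pvMx_append_ne L k v v' (fun h => hvv h.symm)]
      · have hvnS : v ∉ S := fun hmem => hv ((PySem.Set.mem_ofList _ _).1 (List.mem_filter.1 hmem).1)
        have hget : M.get? v = none := (PySem.Dict.get?_eq_none_iff_not_mem_keys M v).2 (hkeys ▸ hvnS)
        have hcont : M.contains v = false := by
          cases hcc : M.contains v
          · rfl
          · exact absurd ((PySem.Dict.contains_iff_mem_keys M v).1 hcc) (hkeys ▸ hvnS)
        have hradd : (PySem.Set.ofList (L.map Prod.snd)).add v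
            = PySem.Set.ofList (L.map Prod.snd) ++ [v] :=
          PySem.Set.add_of_not_mem (fun h => hv ((PySem.Set.mem_ofList _ _).1 h))
        have hks0 : pvKs L v = [] := pvKs_eq_nil_of_not_mem L v hv
        simp only [List.foldl_cons, List.foldl_nil, hc, if_true, hget]
        rw [PySem.Dict.items_insert_of_not_contains M k hcont, ih,
          hRHSset, hradd, List.filter_append, List.map_append, ← hS]
        have hfv : List.filter c [v] = [v] := by simp [hc]
        rw [hfv]
        have htail : List.map (fun v' => (v', pvMx (L ++ [(k, v)]) v')) [v] = [(v, k)] := by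
          simp [pvMx_append_self, hks0]
        rw [htail]
        congr 1
        apply List.map_congr_left
        intro v' hv'
        have hne : v' ≠ v := fun h =>
          hvnS (h ▸ hv')
        simp [pvMx_append_ne L k v v' (fun h => hne h.symm)]
    · have hc' : c v = false := by simpa using hc
      simp only [List.foldl_cons, List.foldl_nil, hc', Bool.false_eq_true, if_false]
      rw [ih, hRHSset]
      have hfilt : ((PySem.Set.ofList (L.map Prod.snd)).add v).filter c = S := by
        by_cases hv : v ∈ PySem.Set.ofList (L.map Prod.snd)
        · rw [PySem.Set.add_of_mem hv, hS]
        · rw [PySem.Set.add_of_not_mem hv, List.filter_append, hS]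
          simp [hc']
      rw [hfilt]
      apply List.map_congr_left
      intro v' hv'
      have hne : v' ≠ v := fun h => by
        have := (List.mem_filter.1 hv').2
        rw [h] at this
        simp [hc'] at this
      simp [pvMx_append_ne L k v v' (fun h => hne h.symm)]

-- A's grouping loop is the canonical modify-loop
theorem conteo_eq_modify (L : List (Int × Int)) :
    (L.foldl (fun (d : PySem.Dict Int (List Int)) (p : Int × Int) =>
        if d.contains p.2 then d.insert p.2 (d.getD p.2 [] ++ [p.1])
        else d.insert p.2 [p.1]) PySem.Dict.empty)
    = L.foldl (fun d p => d.modify p.2 [] (fun l => l ++ [p.1])) PySem.Dict.empty := by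
  apply PySem.List.foldl_congr_mem
  intro d p _
  by_cases h : d.contains p.2 = true
  · simp [h, PySem.Dict.modify]
  · have h' : d.contains p.2 = false := by simpa using h
    simp [h', PySem.Dict.modify, PySem.Dict.getD_of_not_contains _ _ h']

theorem conteo_getD (L : List (Int × Int)) (v : Int) :
    (L.foldl (fun (d : PySem.Dict Int (List Int)) p => d.modify p.2 [] (fun l => l ++ [p.1]))
        PySem.Dict.empty).getD v [] = pvKs L v := by
  have hmap : L.foldl (fun (d : PySem.Dict Int (List Int)) p => d.modify p.2 [] (fun l => l ++ [p.1]))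
        PySem.Dict.empty
      = (L.map (fun p => (p.2, p.1))).foldl
          (fun d q => d.modify q.1 [] (fun l => l ++ [q.2])) PySem.Dict.empty := by
    rw [List.foldl_map]
  rw [hmap, PySem.Dict.getD_foldl_modify_append]
  simp [pvKs, List.filter_map, List.map_map, Function.comp_def]

theorem conteo_items (L : List (Int × Int)) :
    (L.foldl (fun (d : PySem.Dict Int (List Int)) (p : Int × Int) =>
        if d.contains p.2 then d.insert p.2 (d.getD p.2 [] ++ [p.1])
        else d.insert p.2 [p.1]) PySem.Dict.empty).items
      = (PySem.Set.ofList (L.map Prod.snd)).map (fun v => (v, pvKs L v)) := by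
  rw [conteo_eq_modify]
  have hkeys : (L.foldl (fun (d : PySem.Dict Int (List Int)) p =>
      d.modify p.2 [] (fun l => l ++ [p.1])) PySem.Dict.empty).keys
      = PySem.Set.ofList (L.map Prod.snd) := by
    rw [PySem.Dict.keys_foldl_modify_key L Prod.snd [] (fun _ p l => l ++ [p.1])]
    simp [PySem.Set.update_nil_left]
  rw [PySem.Dict.items_eq_map_keys _ (by rw [hkeys]; exact PySem.Set.nodup_ofList _) [], hkeys]
  apply List.map_congr_left
  intro v _
  rw [conteo_getD]

-- A's second loop over the grouped items, in normal form
theorem A_km_eq (L : List (Int × Int)) :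
    ((L.foldl (fun (d : PySem.Dict Int (List Int)) (p : Int × Int) =>
        if d.contains p.2 then d.insert p.2 (d.getD p.2 [] ++ [p.1])
        else d.insert p.2 [p.1]) PySem.Dict.empty).items.foldl
      (fun (m : PySem.Dict Int Int) q =>
        if 1 < q.2.length then
          match PySem.List.max? q.2 (fun y => y) with
          | some key_mayor => m.insert key_mayor q.1
          | none => m
        else m) PySem.Dict.empty)
    = pvD0 L := by
  rw [conteo_items, List.foldl_map]
  have hstep : ∀ (m : PySem.Dict Int Int) (v : Int),
      (if 1 < (v, pvKs L v).2.length then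
        match PySem.List.max? (v, pvKs L v).2 (fun y => y) with
        | some key_mayor => m.insert key_mayor (v, pvKs L v).1
        | none => m
      else m)
      = if pvC L v = true then m.insert (pvMx L v) v else m := by
    intro m v
    by_cases h : 1 < (pvKs L v).length
    · have hne : pvKs L v ≠ [] := by
        intro hnil; rw [hnil] at h; simp at h
      obtain ⟨w, hw⟩ : ∃ w, PySem.List.max? (pvKs L v) (fun y => y) = some w := by
        cases hmm : PySem.List.max? (pvKs L v) (fun y => y) with
        | none => exact absurd ((PySem.List.max?_eq_none_iff _ _).1 hmm) hne
        | some w => exact ⟨w, rfl⟩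
      simp [h, pvC, hw, pvMx]
    · simp [h, pvC]
  rw [PySem.List.foldl_congr_mem _ _ _ _ (fun m v _ => hstep m v), ← List.foldl_filter]
  rfl

-- B's loops, in the same normal form
theorem B_km_eq (L : List (Int × Int)) :
    ((L.foldl (fun (m : PySem.Dict Int Int) (p : Int × Int) =>
        if 1 < (L.foldl (fun (d : PySem.Dict Int Int) p => d.insert p.2 (d.getD p.2 0 + 1))
            PySem.Dict.empty).getD p.2 0 then
          match m.get? p.2 with
          | none => m.insert p.2 p.1
          | some mejor => if mejor < p.1 then m.insert p.2 p.1 else m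
        else m) PySem.Dict.empty).items.foldl
      (fun (km : PySem.Dict Int Int) q => km.insert q.2 q.1) PySem.Dict.empty)
    = pvD0 L := by
  have hcount : ∀ v : Int,
      (L.foldl (fun (d : PySem.Dict Int Int) p => d.insert p.2 (d.getD p.2 0 + 1))
          PySem.Dict.empty).getD v 0 = ((L.map Prod.snd).count v : Int) := by
    intro v
    have hmap : L.foldl (fun (d : PySem.Dict Int Int) p => d.insert p.2 (d.getD p.2 0 + 1))
          PySem.Dict.empty
        = (L.map Prod.snd).foldl (fun d x => d.insert x (d.getD x 0 + 1)) PySem.Dict.empty := by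
      rw [List.foldl_map]
    rw [hmap, PySem.Dict.getD_foldl_insert_add_one]
    simp
  have hcond : ∀ p : Int × Int,
      (1 < (L.foldl (fun (d : PySem.Dict Int Int) p => d.insert p.2 (d.getD p.2 0 + 1))
          PySem.Dict.empty).getD p.2 0) ↔ pvC L p.2 = true := by
    intro p
    rw [hcount, pvC, decide_eq_true_iff, length_pvKs]
    exact_mod_cast Iff.rfl
  have hinner : (L.foldl (fun (m : PySem.Dict Int Int) (p : Int × Int) =>
        if 1 < (L.foldl (fun (d : PySem.Dict Int Int) p => d.insert p.2 (d.getD p.2 0 + 1))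
            PySem.Dict.empty).getD p.2 0 then
          match m.get? p.2 with
          | none => m.insert p.2 p.1
          | some mejor => if mejor < p.1 then m.insert p.2 p.1 else m
        else m) PySem.Dict.empty).items
      = ((PySem.Set.ofList (L.map Prod.snd)).filter (pvC L)).map (fun v => (v, pvMx L v)) := by
    rw [PySem.List.foldl_congr_mem _ _
        (fun (m : PySem.Dict Int Int) (p : Int × Int) =>
          if pvC L p.2 = true then
            match m.get? p.2 with
            | none => m.insert p.2 p.1
            | some mejor => if mejor < p.1 then m.insert p.2 p.1 else m
          else m) _ ?_]
    · exact mejor_items (fun v => pvC L v) L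
    · intro m p _
      by_cases h : pvC L p.2 = true
      · simp [h, (hcond p).2 h]
      · have h2 : ¬ (1 < (L.foldl (fun (d : PySem.Dict Int Int) p => d.insert p.2 (d.getD p.2 0 + 1))
            PySem.Dict.empty).getD p.2 0) := fun hh => h ((hcond p).1 hh)
        simp [h, h2]
  rw [hinner, List.foldl_map]
  rfl

-- ===== VERDICT (by name: the statement is the Claim_ definition above) =====
theorem key_mayor_valor_repetido_spec : Claim_equal_key_mayor_valor_repetido := by
  intro L _
  unfold Spec_key_mayor_valor_repetido key_mayor_valor_repetido key_mayor_valor_repetido_alt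
  simp only [A_km_eq L, B_km_eq L]
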